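-- pv_equiv track=rewrite | github.com/Ta1265/practice | python/exam.py | solution
-- ===== SOURCE A (Python) =====
-- def follow(curVert, graph, visited):
--     depth = 1
--     edges = graph[curVert]
--     for vert in edges:
--         if vert not in visited:
--             visited.add(vert)
--             depth += follow(vert, graph, visited)
--     return depth
--
-- def solution(blocks):
--     # construct the graph
--     graph = {}
--     for i in range(0, len(blocks)):
--         graph[i] = []
--         if i > 0 and blocks[i-1] >= blocks[i]:
--             graph[i].append(i-1)
--         if i < len(blocks) - 1 and blocks[i+1] >= blocks[i]:
--             graph[i].append(i+1)
--
--     max_dist = 0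
--     start = -1
--     for i in range(0, len(blocks)):
--         dist = follow(i, graph, {i})
--         if dist > max_dist:
--             max_dist = dist
--             start = i
--     return start
-- ===== SOURCE B (Python) =====
-- def solution(blocks):
--     # O(n) two-pass DP: reachable set from i is the maximal non-increasing run
--     # to the left plus the non-decreasing run to the right; scan right-to-left
--     # with >= ties so the leftmost strict maximum wins, as in the original.
--     n = len(blocks)
--     left = []
--     run = 0
--     for i in range(n):
--         if i > 0 and blocks[i - 1] >= blocks[i]:
--             run += 1
--         else:
--             run = 0
--         left.append(run)
--     best = 0
--     start = -1
--     run = 0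
--     for i in range(n - 1, -1, -1):
--         if i < n - 1 and blocks[i + 1] >= blocks[i]:
--             run += 1
--         else:
--             run = 0
--         d = left[i] + run + 1
--         if d >= best:
--             best = d
--             start = i
--     return start
-- ===== Notes on version B (the rewrite author's own statement) =====
-- stated objective: faster
-- what changed: A builds an explicit graph and runs a recursive DFS from every index (quadratic); B observes that the reachable set from i is exactly the non-increasing run to its left plus the non-decreasing run to its right, computes both run lengths with two linear DP passes and picks the leftmost maximum in the same scan.
import Mathlib
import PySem

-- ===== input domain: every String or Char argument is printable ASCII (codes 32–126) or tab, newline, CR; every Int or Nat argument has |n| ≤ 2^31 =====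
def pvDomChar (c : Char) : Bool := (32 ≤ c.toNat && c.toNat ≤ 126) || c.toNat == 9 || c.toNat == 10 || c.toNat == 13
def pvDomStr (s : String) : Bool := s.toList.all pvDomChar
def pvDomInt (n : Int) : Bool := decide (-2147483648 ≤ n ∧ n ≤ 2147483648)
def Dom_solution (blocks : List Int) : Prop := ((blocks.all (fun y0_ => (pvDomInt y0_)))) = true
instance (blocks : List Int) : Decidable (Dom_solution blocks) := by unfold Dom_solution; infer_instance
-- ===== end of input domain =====

-- B replaces A's per-index recursive DFS over an explicit graph by two linear
-- run-length DP passes (faster: asymptotic, O(n^2) -> O(n)); return value only.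

-- ===== PORT A =====
-- 'graph = {}; for i in range(len(blocks)): ...' of A, extracted as a named helper
def buildGraph (blocks : List Int) : PySem.Dict Int (List Int) :=
  (PySem.List.pyRange 0 blocks.length).foldl (fun g i =>
    let es : List Int := []
    let es := if 0 < i ∧ PySem.List.pyGetD blocks (i-1) 0 ≥ PySem.List.pyGetD blocks i 0
              then es ++ [i-1] else es
    let es := if i < (blocks.length : Int) - 1 ∧ PySem.List.pyGetD blocks (i+1) 0 ≥ PySem.List.pyGetD blocks i 0
              then es ++ [i+1] else es
    g.insert i es) PySem.Dict.empty

-- 'follow' of A; the extra fuel argument is a totality guard only (fuel = len(blocks)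
-- is always sufficient, the 0 branch is never reached); visited is threaded instead of mutated.
def followA (graph : PySem.Dict Int (List Int)) : Nat → Int → PySem.Set Int → Int × PySem.Set Int
  | 0, _, visited => (1, visited)
  | fuel+1, curVert, visited =>
    let edges := (graph.get? curVert).getD []
    edges.foldl (fun st vert =>
      if vert ∈ st.2 then st
      else
        let r := followA graph fuel vert (PySem.Set.add st.2 vert)
        (st.1 + r.1, r.2)) (1, visited)

def solution (blocks : List Int) : Int :=
  let graph := buildGraph blocks
  let r := (PySem.List.pyRange 0 blocks.length).foldl (fun (p : Int × Int) i =>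
    let dist := (followA graph blocks.length i (PySem.Set.ofList [i])).1
    if dist > p.1 then (dist, i) else p) (0, -1)
  r.2

-- ===== PORT B =====
def solution_alt (blocks : List Int) : Int :=
  let n : Int := blocks.length
  let left := ((PySem.List.pyRange 0 n).foldl (fun (st : List Int × Int) i =>
    let run := if 0 < i ∧ PySem.List.pyGetD blocks (i-1) 0 ≥ PySem.List.pyGetD blocks i 0
               then st.2 + 1 else 0
    (st.1 ++ [run], run)) ([], 0)).1
  let r := (PySem.List.pyRange (n-1) (-1) (-1)).foldl (fun (st : Int × Int × Int) i =>
    let run := if i < n - 1 ∧ PySem.List.pyGetD blocks (i+1) 0 ≥ PySem.List.pyGetD blocks i 0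
               then st.2.2 + 1 else 0
    let d := PySem.List.pyGetD left i 0 + run + 1
    if d ≥ st.1 then (d, i, run) else (st.1, st.2.1, run)) (0, -1, 0)
  r.2.1

-- ===== PRECONDITION & SPEC =====
def Spec_solution (blocks : List Int) (out : Int) : Prop := out = solution_alt blocks
instance (blocks : List Int) (out : Int) : Decidable (Spec_solution blocks out) := by unfold Spec_solution; infer_instance

-- ===== CLAIM (what is proved, stated in full; the proofs are below) =====
def Claim_equal_solution : Prop := ∀ (blocks : List Int), Dom_solution blocks → Spec_solution blocks (solution blocks)

-- ===== LEMMAS AND PROOFS =====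

-- length of the non-increasing run ending at i (number of uphill-left moves from i)
def lcnt (b : List Int) : Nat → Nat
  | 0 => 0
  | i+1 => if b.getD i 0 ≥ b.getD (i+1) 0 then lcnt b i + 1 else 0

-- length of the non-decreasing run starting at i (number of uphill-right moves from i)
def rcnt (b : List Int) (i : Nat) : Nat :=
  if h : i + 1 < b.length then
    (if b.getD (i+1) 0 ≥ b.getD i 0 then rcnt b (i+1) + 1 else 0)
  else 0
termination_by b.length - i

def dval (b : List Int) (i : Nat) : Int := 1 + lcnt b i + rcnt b i

-- state of A's answer loop after processing indices 0..k-1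
def TT (b : List Int) : Nat → Int × Int
  | 0 => (0, -1)
  | k+1 => if dval b k > (TT b k).1 then (dval b k, (k : Int)) else TT b k

-- state of B's answer loop after processing indices k..n-1 (downwards)
def SS (b : List Int) (k : Nat) : Int × Int :=
  if h : k < b.length then
    (let rest := SS b (k+1); if dval b k ≥ rest.1 then (dval b k, (k : Int)) else rest)
  else (0, -1)
termination_by b.length - k

-- the edge list A's graph stores at index i
def edgesAt (b : List Int) (i : Nat) : List Int :=
  (if 0 < (i:Int) ∧ PySem.List.pyGetD b ((i:Int)-1) 0 ≥ PySem.List.pyGetD b (i:Int) 0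
   then [(i:Int)-1] else []) ++
  (if (i:Int) < (b.length:Int) - 1 ∧ PySem.List.pyGetD b ((i:Int)+1) 0 ≥ PySem.List.pyGetD b (i:Int) 0
   then [(i:Int)+1] else [])

theorem pyRange_len_nodup (b : List Int) : (PySem.List.pyRange 0 b.length).Nodup := by
  rw [PySem.List.pyRange_zero_natCast]
  exact List.nodup_range.map (fun _ _ h => by exact_mod_cast h)

-- the value the build loop stores for key i, with its two sequential ifs flattened
def vAt (b : List Int) (i : Int) : List Int :=
  (if 0 < i ∧ PySem.List.pyGetD b (i-1) 0 ≥ PySem.List.pyGetD b i 0 then [i-1] else ([]:List Int)) ++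
  (if i < (b.length:Int) - 1 ∧ PySem.List.pyGetD b (i+1) 0 ≥ PySem.List.pyGetD b i 0 then [i+1] else [])

theorem buildGraph_eq (b : List Int) :
    buildGraph b = (PySem.List.pyRange 0 b.length).foldl (fun g i => g.insert i (vAt b i)) PySem.Dict.empty := by
  unfold buildGraph vAt
  apply PySem.List.foldl_congr_mem
  intro g i _
  by_cases h1 : 0 < i ∧ PySem.List.pyGetD b (i-1) 0 ≥ PySem.List.pyGetD b i 0 <;>
    by_cases h2 : i < (b.length:Int) - 1 ∧ PySem.List.pyGetD b (i+1) 0 ≥ PySem.List.pyGetD b i 0 <;>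
      simp [h1, h2]

theorem buildGraph_items (b : List Int) :
    (buildGraph b).items = (PySem.List.pyRange 0 b.length).map (fun i => (i, vAt b i)) := by
  rw [buildGraph_eq]
  exact PySem.Dict.items_foldl_insert_fresh _ (fun i => i) (vAt b) _ (fun _ _ => rfl)
    (by simpa using pyRange_len_nodup b)

theorem buildGraph_keys_nodup (b : List Int) : (buildGraph b).keys.Nodup := by
  have : (buildGraph b).keys = (PySem.List.pyRange 0 b.length) := by
    show (buildGraph b).items.map Prod.fst = _
    rw [buildGraph_items, List.map_map]
    exact List.map_id _
  rw [this]; exact pyRange_len_nodup b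

theorem buildGraph_get (b : List Int) (i : Nat) (hi : i < b.length) :
    (buildGraph b).get? (i:Int) = some (edgesAt b i) := by
  have hmem : ((i:Int), vAt b (i:Int)) ∈ (buildGraph b).items := by
    rw [buildGraph_items]
    exact List.mem_map_of_mem (by rw [PySem.List.mem_pyRange_one]; omega)
  have := PySem.Dict.get?_of_mem_items _ hmem (buildGraph_keys_nodup b)
  rw [this]; rfl

theorem dval_pos (b : List Int) (i : Nat) : 1 ≤ dval b i := by
  unfold dval
  have h1 : (0:Int) ≤ (lcnt b i : Int) := Int.natCast_nonneg _
  have h2 : (0:Int) ≤ (rcnt b i : Int) := Int.natCast_nonneg _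
  omega

theorem lcnt_succ (b : List Int) (w : Nat) :
    lcnt b (w+1) = if b.getD w 0 ≥ b.getD (w+1) 0 then lcnt b w + 1 else 0 := rfl

theorem rcnt_eq (b : List Int) (v : Nat) :
    rcnt b v = if v+1 < b.length ∧ b.getD (v+1) 0 ≥ b.getD v 0 then rcnt b (v+1) + 1 else 0 := by
  rw [rcnt]
  by_cases h : v + 1 < b.length
  · simp only [dif_pos h]
    by_cases h2 : b.getD (v+1) 0 ≥ b.getD v 0
    · rw [if_pos h2, if_pos ⟨h, h2⟩]
    · rw [if_neg h2, if_neg (by tauto)]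
  · simp [h]

-- edgesAt with the index tests restated over Nat
theorem edgesAt_eq (b : List Int) (v : Nat) :
    edgesAt b v =
      (if 0 < v ∧ b.getD (v-1) 0 ≥ b.getD v 0 then [(v:Int)-1] else []) ++
      (if v+1 < b.length ∧ b.getD (v+1) 0 ≥ b.getD v 0 then [(v:Int)+1] else []) := by
  unfold edgesAt
  congr 1
  · rcases Nat.eq_zero_or_pos v with rfl | hv
    · simp
    · have h1 : ((v:Int)) - 1 = ((v-1 : Nat) : Int) := by omega
      rw [h1, PySem.List.pyGetD_natCast, PySem.List.pyGetD_natCast]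
      congr 1
      simp only [eq_iff_iff]
      constructor <;> rintro ⟨h, h'⟩ <;> exact ⟨by omega, h'⟩
  · have h1 : ((v:Int)) + 1 = ((v+1 : Nat) : Int) := by push_cast; ring
    rw [h1, PySem.List.pyGetD_natCast, PySem.List.pyGetD_natCast]
    congr 1
    simp only [eq_iff_iff]
    constructor <;> rintro ⟨h, h'⟩ <;> exact ⟨by omega, h'⟩

-- the loop body of followA, named for reasoning
def stepA (G : PySem.Dict Int (List Int)) (f : Nat) : (Int × PySem.Set Int) → Int → (Int × PySem.Set Int) :=
  fun st vert =>
    if vert ∈ st.2 then st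
    else
      let r := followA G f vert (PySem.Set.add st.2 vert)
      (st.1 + r.1, r.2)

theorem followA_step (b : List Int) (f : Nat) (v : Nat) (hv : v < b.length) (V : PySem.Set Int) :
    followA (buildGraph b) (f+1) (v:Int) V = (edgesAt b v).foldl (stepA (buildGraph b) f) (1, V) := by
  show (((buildGraph b).get? (v:Int)).getD []).foldl _ _ = _
  rw [buildGraph_get b v hv]
  rfl

-- left-phase characterisation of followA
theorem followA_left (b : List Int) : ∀ (v f : Nat) (hi : Int) (V : PySem.Set Int),
    v < b.length → (v:Int) + 1 ≤ hi → (∀ x : Int, x ∈ V ↔ (v:Int) ≤ x ∧ x ≤ hi) → v + 1 ≤ f →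
    (followA (buildGraph b) f (v:Int) V).1 = 1 + (lcnt b v : Int)
    ∧ ∀ x : Int, x ∈ (followA (buildGraph b) f (v:Int) V).2 ↔ (v:Int) - lcnt b v ≤ x ∧ x ≤ hi := by
  intro v
  induction v with
  | zero =>
    intro f hi V hv hhi hV hf
    obtain ⟨f', rfl⟩ : ∃ f', f = f' + 1 := ⟨f - 1, by omega⟩
    rw [followA_step b f' 0 hv V, edgesAt_eq]
    rw [if_neg (by simp : ¬(0 < 0 ∧ b.getD (0-1) 0 ≥ b.getD 0 0)), List.nil_append]
    by_cases hc2 : 0+1 < b.length ∧ b.getD (0+1) 0 ≥ b.getD 0 0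
    · rw [if_pos hc2]
      have hmem : ((0:Nat):Int) + 1 ∈ (((1:Int), V) : Int × PySem.Set Int).2 := by
        rw [hV]; constructor <;> omega
      rw [List.foldl_cons, List.foldl_nil, stepA, if_pos hmem]
      refine ⟨by simp [lcnt], fun x => ?_⟩
      rw [hV]; simp [lcnt]
    · rw [if_neg hc2, List.foldl_nil]
      refine ⟨by simp [lcnt], fun x => ?_⟩
      rw [hV]; simp [lcnt]
  | succ w ih =>
    intro f hi V hv hhi hV hf
    obtain ⟨f', rfl⟩ : ∃ f', f = f' + 1 := ⟨f - 1, by omega⟩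
    rw [followA_step b f' (w+1) hv V, edgesAt_eq]
    have hc1cond : (0 < w+1 ∧ b.getD (w+1-1) 0 ≥ b.getD (w+1) 0) ↔ b.getD w 0 ≥ b.getD (w+1) 0 := by
      simp
    by_cases hc1 : b.getD w 0 ≥ b.getD (w+1) 0
    · -- left edge exists
      rw [if_pos (hc1cond.mpr hc1)]
      have hwcast : ((w+1:Nat):Int) - 1 = (w:Int) := by push_cast; ring
      have hnot : ¬ (((w+1:Nat):Int) - 1 ∈ (((1:Int), V) : Int × PySem.Set Int).2) := by
        rw [hwcast, hV]; push_cast; omega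
      have hV' : ∀ x : Int, x ∈ PySem.Set.add V ((w:Nat):Int) ↔ (w:Int) ≤ x ∧ x ≤ hi := by
        intro x
        rw [PySem.Set.mem_add, hV]
        constructor
        · rintro (⟨h1, h2⟩ | rfl)
          · push_cast at h1 ⊢; omega
          · constructor
            · omega
            · push_cast at hhi; omega
        · intro ⟨h1, h2⟩
          by_cases hx : x = (w:Int)
          · right; exact hx
          · left; constructor
            · omega
            · exact h2
      obtain ⟨ihd, ihm⟩ := ih f' hi (PySem.Set.add V ((w:Nat):Int)) (by omega)
        (by push_cast at hhi ⊢; omega) hV' (by omega)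
      rw [List.cons_append, List.foldl_cons]
      rw [show stepA (buildGraph b) f' (1, V) (((w+1:Nat):Int) - 1)
            = (1 + (followA (buildGraph b) f' ((w:Nat):Int) (PySem.Set.add V ((w:Nat):Int))).1,
               (followA (buildGraph b) f' ((w:Nat):Int) (PySem.Set.add V ((w:Nat):Int))).2) from by
        rw [stepA, if_neg hnot, hwcast]]
      set r := followA (buildGraph b) f' ((w:Nat):Int) (PySem.Set.add V ((w:Nat):Int)) with hr
      have hlc : lcnt b (w+1) = lcnt b w + 1 := by rw [lcnt_succ, if_pos hc1]
      by_cases hc2 : (w+1)+1 < b.length ∧ b.getD ((w+1)+1) 0 ≥ b.getD (w+1) 0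
      · rw [if_pos hc2, List.nil_append]
        have hmem : ((w+1:Nat):Int) + 1 ∈ ((1 + r.1, r.2) : Int × PySem.Set Int).2 := by
          show _ ∈ r.2
          rw [ihm]; constructor
          · push_cast; omega
          · push_cast at hhi ⊢; omega
        rw [List.foldl_cons, List.foldl_nil, stepA, if_pos hmem]
        refine ⟨by rw [ihd, hlc]; push_cast; ring, fun x => ?_⟩
        show x ∈ r.2 ↔ _
        rw [ihm, hlc]; push_cast; omega
      · rw [if_neg hc2, List.nil_append, List.foldl_nil]
        refine ⟨by rw [ihd, hlc]; push_cast; ring, fun x => ?_⟩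
        show x ∈ r.2 ↔ _
        rw [ihm, hlc]; push_cast; omega
    · -- no left edge
      rw [if_neg (by rw [hc1cond]; exact hc1)]
      have hlc : lcnt b (w+1) = 0 := by rw [lcnt_succ, if_neg hc1]
      rw [List.nil_append]
      by_cases hc2 : (w+1)+1 < b.length ∧ b.getD ((w+1)+1) 0 ≥ b.getD (w+1) 0
      · rw [if_pos hc2]
        have hmem : ((w+1:Nat):Int) + 1 ∈ (((1:Int), V) : Int × PySem.Set Int).2 := by
          rw [hV]; constructor
          · omega
          · exact hhi
        rw [List.foldl_cons, List.foldl_nil, stepA, if_pos hmem]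
        refine ⟨by rw [hlc]; simp, fun x => ?_⟩
        rw [hV, hlc]; push_cast; omega
      · rw [if_neg hc2, List.foldl_nil]
        refine ⟨by rw [hlc]; simp, fun x => ?_⟩
        rw [hV, hlc]; push_cast; omega

-- right-phase characterisation of followA
theorem followA_right (b : List Int) : ∀ (f : Nat) (v : Nat) (lo : Int) (V : PySem.Set Int), v < b.length →
      lo ≤ (v:Int) - 1 → (∀ x : Int, x ∈ V ↔ lo ≤ x ∧ x ≤ (v:Int)) → b.length - v ≤ f →
      (followA (buildGraph b) f (v:Int) V).1 = 1 + (rcnt b v : Int)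
      ∧ ∀ x : Int, x ∈ (followA (buildGraph b) f (v:Int) V).2 ↔ lo ≤ x ∧ x ≤ (v:Int) + rcnt b v := by
  intro f
  induction f with
  | zero => intro v lo V hv hlo hV hf; omega
  | succ f' ih =>
    intro v lo V hv hlo hV hf
    rw [followA_step b f' v hv V, edgesAt_eq]
    -- process the (possible) left edge: it is always already visited
    have hAfterL : ∀ (R : List Int),
        ((if 0 < v ∧ b.getD (v-1) 0 ≥ b.getD v 0 then [(v:Int)-1] else []) ++ R).foldl
          (stepA (buildGraph b) f') (1, V)
        = R.foldl (stepA (buildGraph b) f') (1, V) := by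
      intro R
      by_cases hc1 : 0 < v ∧ b.getD (v-1) 0 ≥ b.getD v 0
      · rw [if_pos hc1, List.cons_append, List.nil_append, List.foldl_cons]
        have hmem : (v:Int) - 1 ∈ (((1:Int), V) : Int × PySem.Set Int).2 := by
          rw [hV]; omega
        rw [stepA, if_pos hmem]
      · rw [if_neg hc1, List.nil_append]
    rw [hAfterL]
    by_cases hc2 : v+1 < b.length ∧ b.getD (v+1) 0 ≥ b.getD v 0
    · rw [if_pos hc2, List.foldl_cons]
      have hnot : ¬ ((v:Int) + 1 ∈ (((1:Int), V) : Int × PySem.Set Int).2) := by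
        rw [hV]; omega
      have hcast : ((v+1:Nat):Int) = (v:Int) + 1 := by push_cast; ring
      have hV' : ∀ x : Int, x ∈ PySem.Set.add V ((v:Int)+1) ↔ lo ≤ x ∧ x ≤ ((v+1:Nat):Int) := by
        intro x
        rw [PySem.Set.mem_add, hV, hcast]
        omega
      obtain ⟨ihd, ihm⟩ := ih (v+1) lo (PySem.Set.add V ((v:Int)+1)) hc2.1
        (by rw [hcast]; omega) hV' (by omega)
      rw [stepA, if_neg hnot]
      have hrc : rcnt b v = rcnt b (v+1) + 1 := by rw [rcnt_eq, if_pos hc2]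
      rw [List.foldl_nil]
      rw [hcast] at ihd ihm
      refine ⟨?_, fun x => ?_⟩
      · show 1 + (followA (buildGraph b) f' ((v:Int)+1) (PySem.Set.add V ((v:Int)+1))).1 = _
        rw [ihd, hrc]; push_cast; ring
      · show x ∈ (followA (buildGraph b) f' ((v:Int)+1) (PySem.Set.add V ((v:Int)+1))).2 ↔ _
        rw [ihm, hrc]; push_cast; omega
    · rw [if_neg hc2, List.foldl_nil]
      have hrc : rcnt b v = 0 := by rw [rcnt_eq, if_neg hc2]
      refine ⟨by rw [hrc]; simp, fun x => ?_⟩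
      rw [hV, hrc]; push_cast; omega

theorem followA_start (b : List Int) (i : Nat) (hi : i < b.length) :
    (followA (buildGraph b) b.length (i:Int) (PySem.Set.ofList [(i:Int)])).1 = dval b i := by
  obtain ⟨m, hm⟩ : ∃ m, b.length = m + 1 := ⟨b.length - 1, by omega⟩
  have hmem0 : ∀ x : Int, x ∈ PySem.Set.ofList [(i:Int)] ↔ (i:Int) ≤ x ∧ x ≤ (i:Int) := by
    intro x
    rw [PySem.Set.mem_ofList, List.mem_singleton]
    omega
  rw [hm, followA_step b m i hi, edgesAt_eq]
  have hafterL : ∃ p : Int × PySem.Set Int,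
      ((if 0 < i ∧ b.getD (i-1) 0 ≥ b.getD i 0 then [(i:Int)-1] else []) ++
       (if i+1 < b.length ∧ b.getD (i+1) 0 ≥ b.getD i 0 then [(i:Int)+1] else [])).foldl
        (stepA (buildGraph b) m) (1, PySem.Set.ofList [(i:Int)])
      = (if i+1 < b.length ∧ b.getD (i+1) 0 ≥ b.getD i 0 then [(i:Int)+1] else []).foldl
        (stepA (buildGraph b) m) p
      ∧ p.1 = 1 + (lcnt b i : Int)
      ∧ (∀ x : Int, x ∈ p.2 ↔ (i:Int) - lcnt b i ≤ x ∧ x ≤ (i:Int)) := by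
    by_cases hc1 : 0 < i ∧ b.getD (i-1) 0 ≥ b.getD i 0
    · obtain ⟨w, rfl⟩ : ∃ w, i = w + 1 := ⟨i - 1, by omega⟩
      rw [if_pos hc1, List.cons_append, List.nil_append, List.foldl_cons]
      have hnot : ¬ (((w+1:Nat):Int) - 1 ∈ (((1:Int), PySem.Set.ofList [((w+1:Nat):Int)]) : Int × PySem.Set Int).2) := by
        rw [show ((w+1:Nat):Int) - 1 = (w:Int) from by push_cast; ring, hmem0]
        push_cast; omega
      rw [stepA, if_neg hnot]
      have hwcast : ((w+1:Nat):Int) - 1 = (w:Int) := by push_cast; ring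
      rw [hwcast]
      have hV1 : ∀ x : Int, x ∈ PySem.Set.add (PySem.Set.ofList [((w+1:Nat):Int)]) ((w:Nat):Int)
          ↔ (w:Int) ≤ x ∧ x ≤ (w:Int) + 1 := by
        intro x
        rw [PySem.Set.mem_add, hmem0]
        push_cast; omega
      obtain ⟨ihd, ihm⟩ := followA_left b w m ((w:Int)+1)
        (PySem.Set.add (PySem.Set.ofList [((w+1:Nat):Int)]) ((w:Nat):Int))
        (by omega) (by omega) hV1 (by omega)
      have hc1' : b.getD w 0 ≥ b.getD (w+1) 0 := by simpa using hc1.2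
      refine ⟨_, rfl, ?_, ?_⟩
      · show 1 + (followA (buildGraph b) m ((w:Nat):Int) _).1 = _
        rw [ihd, lcnt_succ, if_pos hc1']
        push_cast; ring
      · intro x
        show x ∈ (followA (buildGraph b) m ((w:Nat):Int) _).2 ↔ _
        rw [ihm, lcnt_succ, if_pos hc1']
        push_cast; omega
    · rw [if_neg hc1, List.nil_append]
      have hlc : lcnt b i = 0 := by
        rcases Nat.eq_zero_or_pos i with rfl | hpos
        · rfl
        · obtain ⟨w, rfl⟩ : ∃ w, i = w + 1 := ⟨i - 1, by omega⟩
          rw [lcnt_succ, if_neg (fun hcc => hc1 ⟨by omega, by simpa using hcc⟩)]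
      exact ⟨_, rfl, by rw [hlc]; simp, fun x => by rw [hmem0, hlc]; omega⟩
  obtain ⟨p, heq, hp1, hp2⟩ := hafterL
  rw [heq]
  by_cases hc2 : i+1 < b.length ∧ b.getD (i+1) 0 ≥ b.getD i 0
  · rw [if_pos hc2, List.foldl_cons]
    have hnot : ¬ ((i:Int) + 1 ∈ p.2) := by rw [hp2]; omega
    rw [stepA, if_neg hnot]
    have hV2 : ∀ x : Int, x ∈ PySem.Set.add p.2 ((i:Int)+1) ↔ ((i:Int) - lcnt b i) ≤ x ∧ x ≤ ((i+1:Nat):Int) := by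
      intro x
      rw [PySem.Set.mem_add, hp2]
      push_cast; omega
    obtain ⟨ihd, -⟩ := followA_right b m (i+1) ((i:Int) - lcnt b i) (PySem.Set.add p.2 ((i:Int)+1))
      hc2.1 (by push_cast; omega) hV2 (by omega)
    have hcast : ((i+1:Nat):Int) = (i:Int) + 1 := by push_cast; ring
    rw [hcast] at ihd
    rw [List.foldl_nil]
    show p.1 + (followA (buildGraph b) m ((i:Int)+1) (PySem.Set.add p.2 ((i:Int)+1))).1 = _
    have hrc : rcnt b i = rcnt b (i+1) + 1 := by rw [rcnt_eq, if_pos hc2]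
    rw [ihd, hp1]
    unfold dval
    rw [hrc]
    push_cast; ring
  · rw [if_neg hc2, List.foldl_nil, hp1]
    unfold dval
    rw [rcnt_eq, if_neg hc2]
    push_cast; ring

theorem TT_succ (b : List Int) (k : Nat) :
    TT b (k+1) = if dval b k > (TT b k).1 then (dval b k, (k:Int)) else TT b k := rfl

theorem SS_eq_of_lt (b : List Int) (k : Nat) (h : k < b.length) :
    SS b k = if dval b k ≥ (SS b (k+1)).1 then (dval b k, (k:Int)) else SS b (k+1) := by
  rw [SS, dif_pos h]

theorem SS_eq_of_ge (b : List Int) (k : Nat) (h : ¬ k < b.length) : SS b k = (0, -1) := by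
  rw [SS, dif_neg h]

theorem TT_spec (b : List Int) (k : Nat) (hk : 1 ≤ k) :
    ∃ j < k, TT b k = (dval b j, (j:Int)) ∧ (∀ m < k, dval b m ≤ dval b j)
      ∧ (∀ m < j, dval b m < dval b j) := by
  induction k with
  | zero => omega
  | succ k ih =>
    rcases Nat.eq_zero_or_pos k with rfl | hk'
    · refine ⟨0, by omega, ?_, ?_, ?_⟩
      · rw [TT_succ, if_pos]
        show dval b 0 > (0:Int)
        have := dval_pos b 0; omega
      · intro m hm; interval_cases m; exact le_refl _
      · intro m hm; omega
    · obtain ⟨j, hjk, hTT, hmax, hstrict⟩ := ih hk'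
      rw [TT_succ, hTT]
      by_cases h : dval b k > dval b j
      · rw [if_pos h]
        refine ⟨k, by omega, rfl, ?_, ?_⟩
        · intro m hm
          rcases Nat.lt_or_ge m k with h' | h'
          · exact le_of_lt (lt_of_le_of_lt (hmax m h') h)
          · have : m = k := by omega
            rw [this]
        · intro m hm
          exact lt_of_le_of_lt (hmax m hm) h
      · rw [if_neg h]
        refine ⟨j, by omega, rfl, ?_, hstrict⟩
        intro m hm
        rcases Nat.lt_or_ge m k with h' | h'
        · exact hmax m h'
        · have : m = k := by omega
          rw [this]; omega

theorem SS_spec_aux (b : List Int) : ∀ (d k : Nat), b.length - k = d → k < b.length →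
    ∃ j, k ≤ j ∧ j < b.length ∧ SS b k = (dval b j, (j:Int))
      ∧ (∀ m, k ≤ m → m < b.length → dval b m ≤ dval b j)
      ∧ (∀ m, k ≤ m → m < j → dval b m < dval b j) := by
  intro d
  induction d with
  | zero => intro k hd hk; omega
  | succ d ih =>
    intro k hd hk
    by_cases hk1 : k + 1 < b.length
    · obtain ⟨j, hj1, hj2, hSS, hmax, hstrict⟩ := ih (k+1) (by omega) hk1
      rw [SS_eq_of_lt b k hk, hSS]
      by_cases h : dval b k ≥ dval b j
      · rw [if_pos h]
        refine ⟨k, le_refl _, hk, rfl, ?_, ?_⟩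
        · intro m hm hm'
          rcases Nat.eq_or_lt_of_le hm with rfl | h'
          · exact le_refl _
          · exact le_trans (hmax m (by omega) hm') h
        · intro m hm hm'; omega
      · rw [if_neg h]
        refine ⟨j, by omega, hj2, rfl, ?_, ?_⟩
        · intro m hm hm'
          rcases Nat.eq_or_lt_of_le hm with rfl | h'
          · omega
          · exact hmax m (by omega) hm'
        · intro m hm hm'
          rcases Nat.eq_or_lt_of_le hm with rfl | h'
          · omega
          · exact hstrict m (by omega) hm'
    · rw [SS_eq_of_lt b k hk, SS_eq_of_ge b (k+1) hk1, if_pos (by have := dval_pos b k; show dval b k ≥ (0:Int); omega)]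
      refine ⟨k, le_refl _, hk, rfl, ?_, ?_⟩
      · intro m hm hm'
        have : m = k := by omega
        rw [this]
      · intro m hm hm'; omega

theorem SS_spec (b : List Int) (k : Nat) (hk : k < b.length) :
    ∃ j, k ≤ j ∧ j < b.length ∧ SS b k = (dval b j, (j:Int))
      ∧ (∀ m, k ≤ m → m < b.length → dval b m ≤ dval b j)
      ∧ (∀ m, k ≤ m → m < j → dval b m < dval b j) :=
  SS_spec_aux b (b.length - k) k rfl hk

theorem fold_eq_TT (b : List Int) : ∀ (k : Nat), k ≤ b.length →
    ((List.map (fun (j : Nat) => (j:Int)) (List.range k)).foldl (fun (p : Int × Int) i =>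
      let dist := (followA (buildGraph b) b.length i (PySem.Set.ofList [i])).1
      if dist > p.1 then (dist, i) else p) (0, -1)) = TT b k := by
  intro k
  induction k with
  | zero => intro _; rfl
  | succ k ih =>
    intro hk
    rw [List.range_succ, List.map_append, List.foldl_append, ih (by omega)]
    simp only [List.map_cons, List.map_nil, List.foldl_cons, List.foldl_nil]
    rw [followA_start b k (by omega), TT_succ]

theorem solution_eq_TT (b : List Int) : solution b = (TT b b.length).2 := by
  simp only [solution]
  rw [PySem.List.pyRange_zero_natCast, fold_eq_TT b b.length (le_refl _)]

theorem pyRange_desc_nil : PySem.List.pyRange (-1) (-1) (-1) = [] := rfl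

theorem pyRange_desc_cons (a : Int) (ha : 0 ≤ a) :
    PySem.List.pyRange a (-1) (-1) = a :: PySem.List.pyRange (a-1) (-1) (-1) := by
  obtain ⟨n, rfl⟩ := Int.eq_ofNat_of_zero_le ha
  simp only [PySem.List.pyRange]
  norm_num
  rw [if_pos (by omega : (-1:Int) < (n:Int))]
  rcases Nat.eq_zero_or_pos n with rfl | hn
  · simp
  · rw [if_pos hn, List.range_succ_eq_map, List.map_cons, List.map_map]
    simp only [Nat.cast_zero, neg_zero, add_zero]
    congr 1
    apply List.map_congr_left
    intro x _
    simp only [Function.comp_apply]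
    push_cast
    ring

-- the "left" list B's first pass builds holds exactly the lcnt values
theorem fold_left_list (b : List Int) : ∀ (k : Nat), k ≤ b.length →
    ((List.map (fun (j : Nat) => (j:Int)) (List.range k)).foldl (fun (st : List Int × Int) i =>
      let run := if 0 < i ∧ PySem.List.pyGetD b (i-1) 0 ≥ PySem.List.pyGetD b i 0 then st.2 + 1 else 0
      (st.1 ++ [run], run)) ([], 0))
    = (List.map (fun j => (lcnt b j : Int)) (List.range k),
       if k = 0 then 0 else (lcnt b (k-1) : Int)) := by
  intro k
  induction k with
  | zero => intro _; rfl
  | succ k ih =>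
    intro hk
    rw [List.range_succ, List.map_append, List.foldl_append, ih (by omega)]
    simp only [List.map_cons, List.map_nil, List.foldl_cons, List.foldl_nil]
    have hrun : (if 0 < (k:Int) ∧ PySem.List.pyGetD b ((k:Int)-1) 0 ≥ PySem.List.pyGetD b (k:Int) 0
        then (if k = 0 then 0 else (lcnt b (k-1) : Int)) + 1 else 0) = (lcnt b k : Int) := by
      rcases Nat.eq_zero_or_pos k with rfl | hkpos
      · rw [if_neg (by norm_num)]; rfl
      · obtain ⟨w, rfl⟩ : ∃ w, k = w + 1 := ⟨k - 1, by omega⟩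
        have hcast : ((w+1:Nat):Int) - 1 = ((w:Nat):Int) := by push_cast; ring
        rw [hcast, PySem.List.pyGetD_natCast, PySem.List.pyGetD_natCast]
        by_cases hc : b.getD w 0 ≥ b.getD (w+1) 0
        · rw [if_pos ⟨by push_cast; omega, hc⟩, lcnt_succ, if_pos hc]
          simp only [Nat.add_sub_cancel]
          push_cast; ring
        · rw [if_neg (fun hh => hc hh.2), lcnt_succ, if_neg hc]
          rfl
    rw [hrun, List.map_append]
    simp

-- state of B's second pass, bundled with its running rcnt
def WS (b : List Int) (k : Nat) : Int × Int × Int :=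
  ((SS b k).1, (SS b k).2, if k < b.length then (rcnt b k : Int) else 0)

theorem fold_desc (b : List Int) : ∀ (k : Nat), k ≤ b.length →
    ((PySem.List.pyRange ((k:Int)-1) (-1) (-1)).foldl (fun (st : Int × Int × Int) i =>
      let run := if i < (b.length:Int) - 1 ∧ PySem.List.pyGetD b (i+1) 0 ≥ PySem.List.pyGetD b i 0
                 then st.2.2 + 1 else 0
      let d := PySem.List.pyGetD (List.map (fun j => (lcnt b j : Int)) (List.range b.length)) i 0 + run + 1
      if d ≥ st.1 then (d, i, run) else (st.1, st.2.1, run)) (WS b k))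
    = WS b 0 := by
  intro k
  induction k with
  | zero => rw [show ((0:Nat):Int) - 1 = (-1:Int) by norm_num, pyRange_desc_nil]; intro _; rfl
  | succ k ih =>
    intro hk
    have hcast : ((k+1:Nat):Int) - 1 = (k:Int) := by push_cast; ring
    rw [hcast, pyRange_desc_cons (k:Int) (by omega), List.foldl_cons]
    have hstep : (let run := if (k:Int) < (b.length:Int) - 1 ∧ PySem.List.pyGetD b ((k:Int)+1) 0 ≥ PySem.List.pyGetD b (k:Int) 0
                   then (WS b (k+1)).2.2 + 1 else 0
        let d := PySem.List.pyGetD (List.map (fun j => (lcnt b j : Int)) (List.range b.length)) (k:Int) 0 + run + 1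
        if d ≥ (WS b (k+1)).1 then (d, (k:Int), run) else ((WS b (k+1)).1, (WS b (k+1)).2.1, run)) = WS b k := by
      have hkl : k < b.length := by omega
      have hrun : (if (k:Int) < (b.length:Int) - 1 ∧ PySem.List.pyGetD b ((k:Int)+1) 0 ≥ PySem.List.pyGetD b (k:Int) 0
          then (WS b (k+1)).2.2 + 1 else 0) = (rcnt b k : Int) := by
        have hcast1 : ((k:Int)) + 1 = ((k+1:Nat):Int) := by push_cast; ring
        rw [hcast1, PySem.List.pyGetD_natCast, PySem.List.pyGetD_natCast]
        by_cases hc : k + 1 < b.length ∧ b.getD (k+1) 0 ≥ b.getD k 0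
        · rw [if_pos ⟨by omega, hc.2⟩]
          show (if k + 1 < b.length then (rcnt b (k+1) : Int) else 0) + 1 = _
          rw [if_pos hc.1, rcnt_eq b k, if_pos hc]
          push_cast; ring
        · rw [if_neg (by intro hh; exact hc ⟨by omega, hh.2⟩), rcnt_eq b k, if_neg hc]
          rfl
      have hd : PySem.List.pyGetD (List.map (fun j => (lcnt b j : Int)) (List.range b.length)) (k:Int) 0
          = (lcnt b k : Int) := by
        rw [PySem.List.pyGetD_natCast]
        exact PySem.List.getD_map_range _ _ _ _ hkl
      have hdv : (lcnt b k : Int) + (rcnt b k : Int) + 1 = dval b k := by unfold dval; omega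
      simp only [hrun, hd, hdv]
      unfold WS
      rw [SS_eq_of_lt b k hkl]
      by_cases h : dval b k ≥ (SS b (k+1)).1
      · rw [if_pos h, if_pos h, if_pos hkl]
      · rw [if_neg h, if_neg h, if_pos hkl]
    rw [hstep]
    exact ih (by omega)

theorem solution_alt_eq_SS (b : List Int) : solution_alt b = (SS b 0).2 := by
  simp only [solution_alt]
  rw [PySem.List.pyRange_zero_natCast, fold_left_list b b.length (le_refl _)]
  have hWS : WS b b.length = (0, -1, 0) := by
    unfold WS
    rw [SS_eq_of_ge b b.length (by omega)]
    simp
  have h := fold_desc b b.length (le_refl _)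
  rw [hWS] at h
  exact congrArg (fun p : Int × Int × Int => p.2.1) h

-- ===== VERDICT (by name: the statement is the Claim_ definition above) =====
theorem solution_spec : Claim_equal_solution := by
  intro b _
  show solution b = solution_alt b
  rw [solution_eq_TT, solution_alt_eq_SS]
  rcases Nat.eq_zero_or_pos b.length with h0 | hpos
  · rw [h0]; simp [TT, SS, h0]
  · obtain ⟨j1, hj1k, hT, hmax1, hstrict1⟩ := TT_spec b b.length hpos
    obtain ⟨j2, -, hj2n, hS, hmax2, hstrict2⟩ := SS_spec b 0 hpos
    have e : j1 = j2 := by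
      by_contra hne
      rcases Nat.lt_or_ge j1 j2 with h | h
      · exact absurd (hmax1 j2 hj2n) (not_le.mpr (hstrict2 j1 (Nat.zero_le _) h))
      · have h' : j2 < j1 := Nat.lt_of_le_of_ne h (Ne.symm hne)
        exact absurd (hmax2 j1 (Nat.zero_le _) hj1k) (not_le.mpr (hstrict1 j2 h'))
    rw [hT, hS, e]
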